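-- pv_equiv track=rewrite | github.com/juserrrrr/PBLs | Problema1/PBL 2/bibliotecaJosePontes.py | validar_gemas_coluna
-- ===== SOURCE A (Python) =====
-- def validar_gemas_coluna(matriz):#função para preparar a matriz para quebra de gemas e retorna também valores true false para parar o processamento da matriz(Parte feito com base na aula)
--     validacao_coluna = False
--     for coluna in range(len(matriz[0])):
--         contar_gemas = 1
--         for letra in range(len(matriz)-1):
--             if (matriz[letra][coluna]).lower() == (matriz[letra+1][coluna]).lower():
--                 contar_gemas += 1
--             else:
--                 contar_gemas = 1
--             if contar_gemas >= 3:
--                 validacao_coluna = True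
--                 coord = letra + 1
--                 while coord > letra + 1 - contar_gemas and matriz[coord][coluna]:
--                     matriz[coord][coluna] = matriz[coord][coluna].lower()
--                     coord -=1
--     return matriz,validacao_coluna
-- ===== SOURCE B (Python) =====
-- def validar_gemas_coluna(matriz):
--     # Two staged passes per column: first detect the maximal case-insensitive
--     # runs with a boundary scan (run-start index), then lowercase each recorded
--     # segment of length >= 3 exactly once. Mutates matriz in place like A.
--     n = len(matriz)
--     achou = False
--     for col in range(len(matriz[0])):
--         segs = []
--         start = 0
--         for j in range(1, n + 1):
--             if j == n or matriz[j][col].lower() != matriz[j - 1][col].lower():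
--                 if j - start >= 3:
--                     segs.append((start, j))
--                 start = j
--         for (a, b) in segs:
--             achou = True
--             for k in range(a, b):
--                 matriz[k][col] = matriz[k][col].lower()
--     return matriz, achou
-- ===== Notes on version B (the rewrite author's own statement) =====
-- stated objective: faster
-- what changed: B replaces A's fused scan with a backward while-loop that re-lowercases the whole current run at every step once it reaches length 3 by two staged passes per column: a boundary scan tracking the run-start index that records the maximal runs of length >= 3 as segments, then a second pass lowercasing each recorded segment exactly once.
import Mathlib
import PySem

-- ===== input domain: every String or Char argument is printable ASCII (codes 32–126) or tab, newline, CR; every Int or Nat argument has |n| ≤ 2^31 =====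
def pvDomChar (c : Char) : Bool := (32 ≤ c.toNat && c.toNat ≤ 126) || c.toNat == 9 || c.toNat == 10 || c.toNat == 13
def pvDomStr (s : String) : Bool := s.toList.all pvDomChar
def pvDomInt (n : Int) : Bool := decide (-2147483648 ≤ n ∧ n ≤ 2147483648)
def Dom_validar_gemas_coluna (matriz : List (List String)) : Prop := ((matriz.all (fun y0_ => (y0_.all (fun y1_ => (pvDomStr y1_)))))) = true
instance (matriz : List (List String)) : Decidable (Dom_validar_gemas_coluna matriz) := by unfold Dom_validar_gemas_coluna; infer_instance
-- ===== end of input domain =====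

-- B detects the maximal case-insensitive vertical runs of a column first (a boundary scan
-- keeping the run-start index) and then lowercases each recorded ≥3-segment exactly once,
-- instead of A's fused scan whose backward while-loop re-lowercases the whole current run at
-- every step; both Pythons mutate `matriz` in place and leave it in the same final state
-- (the theorem below is about the returned value).

-- ===== PORT A =====
-- matriz[r][c]; the default "" is only a totalizer: under Pre_ every index A reads is in range
def pvCell (m : List (List String)) (r c : Nat) : String := (m.getD r []).getD c ""

-- matriz[r][c] = matriz[r][c].lower()
def pvSetL (m : List (List String)) (r c : Nat) : List (List String) :=
  m.set r ((m.getD r []).set c (PySem.Str.lower (pvCell m r c)))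

-- A's `while coord > letra + 1 - contar_gemas and matriz[coord][coluna]:` loop; the numeric
-- bound allows exactly `contar_gemas` iterations, counted here by `fuel`, with `coord`
-- starting at `letra + 1` and decremented each step exactly as in the Python
def pvWhileA (c : Nat) : List (List String) → Nat → Nat → List (List String)
  | m, _, 0 => m
  | m, coord, fuel + 1 =>
    if pvCell m coord c ≠ "" then pvWhileA c (pvSetL m coord c) (coord - 1) fuel
    else m

-- one iteration of `for letra in range(len(matriz)-1)`;
-- state = (matriz, contar_gemas, validacao_coluna)
def pvStepA (c : Nat) (st : List (List String) × Nat × Bool) (letra : Nat) :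
    List (List String) × Nat × Bool :=
  let m := st.1
  let cnt' := if PySem.Str.lower (pvCell m letra c) == PySem.Str.lower (pvCell m (letra + 1) c)
              then st.2.1 + 1 else 1
  if 3 ≤ cnt' then (pvWhileA c m (letra + 1) cnt', cnt', true)
  else (m, cnt', st.2.2)

-- one iteration of `for coluna in range(len(matriz[0]))`
def pvColA (n c : Nat) (mv : List (List String) × Bool) : List (List String) × Bool :=
  let r := (List.range (n - 1)).foldl (pvStepA c) (mv.1, 1, mv.2)
  (r.1, r.2.2)

def validar_gemas_coluna (matriz : List (List String)) : List (List String) × Bool :=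
  (List.range ((matriz.getD 0 []).length)).foldl
    (fun mv c => pvColA matriz.length c mv) (matriz, false)

-- ===== PORT B =====
-- one iteration of B's detection scan `for j in range(1, n + 1)`; state = (segs, start);
-- the `j == n` disjunct is Python's short-circuit `or`, so row n is never read
def pvScanStep (m : List (List String)) (c n : Nat)
    (st : List (Nat × Nat) × Nat) (j : Nat) : List (Nat × Nat) × Nat :=
  if j = n ∨ ¬ (PySem.Str.lower ((m.getD j []).getD c "") =
                PySem.Str.lower ((m.getD (j - 1) []).getD c "")) then
    ((if 3 ≤ j - st.2 then st.1 ++ [(st.2, j)] else st.1), j)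
  else st

-- one iteration of B's `for col in range(len(matriz[0]))`: detect, then apply the segments
def pvColAlt (n c : Nat) (mv : List (List String) × Bool) : List (List String) × Bool :=
  let segs := ((List.range' 1 n).foldl (pvScanStep mv.1 c n) ([], 0)).1
  segs.foldl
    (fun mv2 seg =>
      ((List.range' seg.1 (seg.2 - seg.1)).foldl
         (fun m k => m.set k ((m.getD k []).set c (PySem.Str.lower ((m.getD k []).getD c ""))))
         mv2.1,
       true))
    mv

def validar_gemas_coluna_alt (matriz : List (List String)) : List (List String) × Bool :=
  (List.range ((matriz.getD 0 []).length)).foldl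
    (fun mv c => pvColAlt matriz.length c mv) (matriz, false)

-- ===== PRECONDITION & SPEC =====
-- Pre_ excludes exactly the inputs on which the Python A raises an IndexError: the empty
-- matrix (matriz[0]), and — when there are at least two rows, so the letter loop runs — any
-- matrix with a row shorter than the first row.
def Pre_validar_gemas_coluna (matriz : List (List String)) : Prop :=
  matriz ≠ [] ∧ (2 ≤ matriz.length →
    ∀ row ∈ matriz, (matriz.headD []).length ≤ row.length)
instance (matriz : List (List String)) : Decidable (Pre_validar_gemas_coluna matriz) := by
  unfold Pre_validar_gemas_coluna; infer_instance

def pvWitness_validar_gemas_coluna : List (List String) := [["A"], ["a"], ["A"], ["b"]]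

def Spec_validar_gemas_coluna (matriz : List (List String)) (out : List (List String) × Bool) : Prop := out = validar_gemas_coluna_alt matriz
instance (matriz : List (List String)) (out : List (List String) × Bool) : Decidable (Spec_validar_gemas_coluna matriz out) := by unfold Spec_validar_gemas_coluna; infer_instance

-- ===== CLAIM (what is proved, stated in full; the proofs are below) =====
def Claim_equal_validar_gemas_coluna : Prop := ∀ (matriz : List (List String)), Dom_validar_gemas_coluna matriz → Pre_validar_gemas_coluna matriz → Spec_validar_gemas_coluna matriz (validar_gemas_coluna matriz)

-- ===== LEMMAS AND PROOFS =====

-- `.lower()` is an idempotent, emptiness-preserving character map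
theorem pv_char_le_iff (a b : Char) : a ≤ b ↔ a.toNat ≤ b.toNat := by
  rw [Char.le_def, UInt32.le_iff_toNat_le]; rfl

theorem pv_char_ofNat_toNat (n : Nat) (h : n.isValidChar) : (Char.ofNat n).toNat = n := by
  unfold Char.ofNat
  simp [h, Char.ofNatAux, Char.toNat]

theorem pv_lowerChar_idem (c : Char) :
    PySem.Chars.lowerChar (PySem.Chars.lowerChar c) = PySem.Chars.lowerChar c := by
  unfold PySem.Chars.lowerChar PySem.Chars.isupper
  by_cases h1 : 'A' ≤ c
  · by_cases h2 : c ≤ 'Z'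
    · have h65 : 65 ≤ c.toNat := (pv_char_le_iff _ _).mp h1
      have h90 : c.toNat ≤ 90 := (pv_char_le_iff _ _).mp h2
      have hv : (c.toNat + 32).isValidChar := by unfold Nat.isValidChar; omega
      have ht : (Char.ofNat (c.toNat + 32)).toNat = c.toNat + 32 := pv_char_ofNat_toNat _ hv
      have hnot : ¬ (Char.ofNat (c.toNat + 32) ≤ 'Z') := by
        rw [pv_char_le_iff, ht]
        have : ('Z').toNat = 90 := by decide
        omega
      simp [h1, h2, hnot]
    · simp [h2]
  · simp [h1]

theorem pv_low_low (s : String) :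
    PySem.Str.lower (PySem.Str.lower s) = PySem.Str.lower s := by
  have h : (PySem.Str.lower (PySem.Str.lower s)).toList = (PySem.Str.lower s).toList := by
    simp [PySem.Str.toList_lower, PySem.Chars.lower, Function.comp, pv_lowerChar_idem]
  exact String.toList_inj.mp h

theorem pv_low_empty_iff (s : String) : PySem.Str.lower s = "" ↔ s = "" := by
  constructor
  · intro h
    have := congrArg String.toList h
    simp [PySem.Str.toList_lower, PySem.Chars.lower] at this
    exact String.toList_inj.mp (by simp [this])
  · intro h; subst h; rfl

theorem pv_low_nil : PySem.Str.lower "" = "" := rfl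

-- cells and dimensions of pvSetL
theorem pv_len_setL (m : List (List String)) (r c : Nat) :
    (pvSetL m r c).length = m.length := by simp [pvSetL]

theorem pv_rowlen_setL (m : List (List String)) (r c i : Nat) :
    ((pvSetL m r c).getD i []).length = (m.getD i []).length := by
  unfold pvSetL
  rcases eq_or_ne i r with rfl | hne
  · by_cases hr : i < m.length
    · simp [List.getD, hr]
    · simp [List.getD, hr]
  · simp [List.getD, hne.symm]

theorem pv_cell_setL (m : List (List String)) (r c i j : Nat) :
    pvCell (pvSetL m r c) i j =
      if i = r ∧ j = c then PySem.Str.lower (pvCell m r c) else pvCell m i j := by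
  unfold pvSetL pvCell
  rcases eq_or_ne i r with rfl | hne
  · by_cases hr : i < m.length
    · have hgd : m.getD i [] = m[i] := List.getD_eq_getElem m [] hr
      rw [hgd]
      rcases eq_or_ne j c with rfl | hnj
      · by_cases hc : j < m[i].length
        · simp [List.getD, hr, hc]
        · have hrow : (m[i] : List String)[j]? = none := List.getElem?_eq_none (by omega)
          simp [List.getD, hr, hc, hrow, pv_low_nil]
      · simp [List.getD, hr, hnj, List.getElem?_set_ne (Ne.symm hnj)]
    · have hm : m[i]? = none := List.getElem?_eq_none (by omega)
      simp [List.getD, hr, hm, pv_low_nil]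
  · simp [List.getD, hne, hne.symm]

-- matrices agreeing in dimensions and cells are equal
theorem pv_matEq (m1 m2 : List (List String))
    (h1 : m1.length = m2.length)
    (h2 : ∀ r, (m1.getD r []).length = (m2.getD r []).length)
    (h3 : ∀ r c, pvCell m1 r c = pvCell m2 r c) : m1 = m2 := by
  apply List.ext_getElem h1
  intro r hr1 hr2
  have hg1 : m1.getD r [] = m1[r] := List.getD_eq_getElem m1 [] hr1
  have hg2 : m2.getD r [] = m2[r] := List.getD_eq_getElem m2 [] hr2
  have hlen : (m1[r] : List String).length = m2[r].length := by
    have := h2 r; rwa [hg1, hg2] at this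
  apply List.ext_getElem hlen
  intro c hc1 hc2
  have := h3 r c
  unfold pvCell at this
  rw [hg1, hg2, List.getD_eq_getElem _ _ hc1, List.getD_eq_getElem _ _ hc2] at this
  exact this

-- proof helper: the window-lowering loop both ports perform (B writes it inline)
def pvFlushB (c : Nat) (m : List (List String)) (a len : Nat) : List (List String) :=
  (List.range' a len).foldl (fun m k => pvSetL m k c) m

-- cells and dimensions of pvFlushB
theorem pv_flush_succ (c : Nat) (m : List (List String)) (a len : Nat) :
    pvFlushB c m a (len + 1) = pvFlushB c (pvSetL m a c) (a + 1) len := by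
  simp [pvFlushB, List.range'_succ]

theorem pv_len_flush (c : Nat) (m : List (List String)) (a len : Nat) :
    (pvFlushB c m a len).length = m.length := by
  induction len generalizing a m with
  | zero => rfl
  | succ n ih => rw [pv_flush_succ, ih, pv_len_setL]

theorem pv_rowlen_flush (c : Nat) (m : List (List String)) (a len i : Nat) :
    ((pvFlushB c m a len).getD i []).length = (m.getD i []).length := by
  induction len generalizing a m with
  | zero => rfl
  | succ n ih => rw [pv_flush_succ, ih, pv_rowlen_setL]

theorem pv_cell_flush (c : Nat) (m : List (List String)) (a len i j : Nat) :
    pvCell (pvFlushB c m a len) i j =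
      if j = c ∧ a ≤ i ∧ i < a + len then PySem.Str.lower (pvCell m i j)
      else pvCell m i j := by
  induction len generalizing a m with
  | zero => simp [pvFlushB]
  | succ n ih =>
    rw [pv_flush_succ, ih, pv_cell_setL]
    by_cases hj : j = c
    · subst hj
      by_cases hw : a + 1 ≤ i ∧ i < a + 1 + n
      · have hia : ¬ (i = a) := by omega
        simp [hw, hia, pv_cell_setL, hw.1, hw.2]
        have : (a ≤ i ∧ i < a + (n+1)) := by omega
        simp [this]
      · by_cases hia : i = a
        · subst hia
          have h1 : (i ≤ i ∧ i < i + (n+1)) := by omega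
          simp [hw, pv_cell_setL, h1, pv_low_low]
        · have h2 : ¬ (a ≤ i ∧ i < a + (n+1)) := by omega
          simp [hw, hia, h2]
          intro h3 h4
          exact absurd h4 (by omega)
    · simp [hj]

theorem pv_low_cell_flush (c : Nat) (m : List (List String)) (a len i j : Nat) :
    PySem.Str.lower (pvCell (pvFlushB c m a len) i j) = PySem.Str.lower (pvCell m i j) := by
  rw [pv_cell_flush]; split_ifs with h
  · rw [pv_low_low]
  · rfl

-- re-flushing an already flushed sub-window changes nothing
theorem pv_flush_flush (c : Nat) (m : List (List String)) (a len a' len' : Nat)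
    (hsub : a ≤ a' ∧ a' + len' ≤ a + len) :
    pvFlushB c (pvFlushB c m a' len') a len = pvFlushB c m a len := by
  apply pv_matEq
  · rw [pv_len_flush, pv_len_flush, pv_len_flush]
  · intro r; rw [pv_rowlen_flush, pv_rowlen_flush, pv_rowlen_flush]
  · intro r j
    rw [pv_cell_flush, pv_cell_flush, pv_cell_flush]
    by_cases h1 : j = c ∧ a ≤ r ∧ r < a + len
    · simp [h1]
      by_cases h2 : a' ≤ r ∧ r < a' + len'
      · simp [h2, pv_low_low]
      · simp [h2]
    · simp [h1]
      intro hj har hrl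
      exact absurd (⟨hj, by omega, by omega⟩ : j = c ∧ a ≤ r ∧ r < a + len) h1

theorem pv_flush_concat (c : Nat) (m : List (List String)) (a len : Nat) :
    pvFlushB c m a (len + 1) = pvSetL (pvFlushB c m a len) (a + len) c := by
  unfold pvFlushB
  rw [List.range'_concat, List.foldl_append]
  simp

theorem pv_flush_setL_comm (c : Nat) (m : List (List String)) (a len r : Nat)
    (hr : ¬ (a ≤ r ∧ r < a + len)) :
    pvFlushB c (pvSetL m r c) a len = pvSetL (pvFlushB c m a len) r c := by
  apply pv_matEq
  · rw [pv_len_flush, pv_len_setL, pv_len_setL, pv_len_flush]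
  · intro i; rw [pv_rowlen_flush, pv_rowlen_setL, pv_rowlen_setL, pv_rowlen_flush]
  · intro i j
    rw [pv_cell_flush, pv_cell_setL, pv_cell_setL, pv_cell_flush, pv_cell_flush]
    by_cases h1 : i = r ∧ j = c
    · obtain ⟨rfl, rfl⟩ := h1
      simp [hr, pv_low_low]
    · by_cases h3 : j = c ∧ a ≤ i ∧ i < a + len
      · have hir : i ≠ r := fun h => h1 ⟨h, h3.1⟩
        simp [hir, h3]
      · simp [h1, h3]

-- A's while loop over a window whose cells share one lower-value equals one window-lowering
theorem pv_whileA_eq_flush (c : Nat) (f : Nat) :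
    ∀ (m : List (List String)) (s : Nat),
    (∀ k, k < f → PySem.Str.lower (pvCell m (s + k) c) = PySem.Str.lower (pvCell m (s + f - 1) c)) →
    pvWhileA c m (s + f - 1) f = pvFlushB c m s f := by
  induction f with
  | zero => intro m s _; rfl
  | succ n ih =>
    intro m s hw
    have hcoord : s + (n + 1) - 1 = s + n := by omega
    rw [hcoord]
    by_cases hne : pvCell m (s + n) c = ""
    · -- the whole window consists of "" cells: both sides are m
      unfold pvWhileA
      simp [hne]
      apply Eq.symm
      apply pv_matEq
      · rw [pv_len_flush]
      · intro r; rw [pv_rowlen_flush]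
      · intro r j
        rw [pv_cell_flush]
        by_cases h1 : j = c ∧ s ≤ r ∧ r < s + (n + 1)
        · obtain ⟨rfl, h2, h3⟩ := h1
          have hk := hw (r - s) (by omega)
          rw [show s + (r - s) = r from by omega, show s + (n + 1) - 1 = s + n from by omega] at hk
          have hcell : pvCell m r j = "" := by
            apply (pv_low_empty_iff _).mp
            rw [hk, hne, pv_low_nil]
          rw [if_pos ⟨rfl, h2, h3⟩, hcell, pv_low_nil]
        · rw [if_neg h1]
    · unfold pvWhileA
      simp only [ne_eq, hne, not_false_eq_true, if_true]
      have ih' := ih (pvSetL m (s + n) c) s ?_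
      · rw [ih', pv_flush_setL_comm c m s n (s + n) (by omega), ← pv_flush_concat]
      · intro k hk
        rw [pv_cell_setL, pv_cell_setL]
        rw [if_neg (by omega : ¬ (s + k = s + n ∧ c = c))]
        rw [if_neg (by omega : ¬ (s + n - 1 = s + n ∧ c = c))]
        have ha := hw k (by omega)
        have hb := hw (n - 1) (by omega)
        rw [show s + (n + 1) - 1 = s + n from by omega] at ha hb
        rw [show s + (n - 1) = s + n - 1 from by omega] at hb
        rw [ha, hb]

-- proof helpers: the fused single-pass intermediate form (flush each run when it ends),
-- the bridge between A's scan and B's detect-then-apply shape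
def pvStepF (c : Nat) (st : List (List String) × Nat × Bool) (j : Nat) :
    List (List String) × Nat × Bool :=
  let m := st.1
  if PySem.Str.lower (pvCell m (j + 1) c) == PySem.Str.lower (pvCell m j c) then
    (m, st.2.1 + 1, st.2.2)
  else if 3 ≤ st.2.1 then (pvFlushB c m (j + 1 - st.2.1) st.2.1, 1, true)
  else (m, 1, st.2.2)

def pvColF (n c : Nat) (mv : List (List String) × Bool) : List (List String) × Bool :=
  let r := (List.range (n - 1)).foldl (pvStepF c) (mv.1, 1, mv.2)
  if 3 ≤ r.2.1 then (pvFlushB c r.1 (n - r.2.1) r.2.1, true)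
  else (r.1, r.2.2)

-- proof helper: the end-of-column flush applied to a scan state
def pvPost (c t k : Nat) (r : List (List String) × Nat × Bool) :
    List (List String) × Nat × Bool :=
  ((if 3 ≤ r.2.1 then pvFlushB c r.1 (t + k + 1 - r.2.1) r.2.1 else r.1),
   r.2.1, (r.2.2 || decide (3 ≤ r.2.1)))

-- the parallel induction: A's scan state is the fused scan state with the pending run (if
-- already of length ≥ 3) lowercased, and A's flag is the fused flag ∨ (pending run ≥ 3)
theorem pv_main (c : Nat) (k : Nat) :
    ∀ (t run : Nat) (m : List (List String)) (v : Bool),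
    1 ≤ run → run ≤ t + 1 →
    (∀ i, t + 1 - run ≤ i → i ≤ t →
      PySem.Str.lower (pvCell m i c) = PySem.Str.lower (pvCell m t c)) →
    (List.range' t k).foldl (pvStepA c)
        ((if 3 ≤ run then pvFlushB c m (t + 1 - run) run else m), run, (v || decide (3 ≤ run)))
      = pvPost c t k ((List.range' t k).foldl (pvStepF c) (m, run, v)) := by
  induction k with
  | zero =>
    intro t run m v h1 h2 hw
    simp [List.range', pvPost]
    rfl
  | succ k ih =>
    intro t run m v h1 h2 hw
    rw [List.range'_succ, List.foldl_cons, List.foldl_cons]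
    by_cases hxy : PySem.Str.lower (pvCell m (t + 1) c) = PySem.Str.lower (pvCell m t c)
    · -- the run continues at t+1
      have hB : pvStepF c (m, run, v) t = (m, run + 1, v) := by
        simp [pvStepF, hxy]
      rw [hB]
      by_cases hr3 : 3 ≤ run
      · -- A has already lowercased the pending run; it extends it and re-lowercases
        have hA : pvStepA c (pvFlushB c m (t + 1 - run) run, run, (v || decide (3 ≤ run))) t
            = (pvFlushB c m (t + 1 - run) (run + 1), run + 1, true) := by
          have hcond : (PySem.Str.lower (pvCell (pvFlushB c m (t + 1 - run) run) t c)
              == PySem.Str.lower (pvCell (pvFlushB c m (t + 1 - run) run) (t + 1) c)) = true := by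
            rw [pv_low_cell_flush, pv_low_cell_flush, hxy]
            simp
          have hwhile : pvWhileA c (pvFlushB c m (t + 1 - run) run) (t + 1) (run + 1)
              = pvFlushB c (pvFlushB c m (t + 1 - run) run) (t + 1 - run) (run + 1) := by
            have := pv_whileA_eq_flush c (run + 1) (pvFlushB c m (t + 1 - run) run) (t + 1 - run) ?_
            · rwa [show t + 1 - run + (run + 1) - 1 = t + 1 from by omega] at this
            · intro kk hkk
              rw [pv_low_cell_flush, pv_low_cell_flush]
              rw [show t + 1 - run + (run + 1) - 1 = t + 1 from by omega, hxy]
              rcases Nat.lt_or_ge (t + 1 - run + kk) (t + 1) with hlt | hge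
              · exact hw _ (by omega) (by omega)
              · rw [show t + 1 - run + kk = t + 1 from by omega, hxy]
          simp only [pvStepA, hcond, if_true]
          rw [if_pos (by omega : 3 ≤ run + 1)]
          rw [hwhile, pv_flush_flush c m _ _ _ _ ⟨le_refl _, by omega⟩]
        rw [if_pos hr3, hA]
        have := ih (t + 1) (run + 1) m v (by omega) (by omega) ?_
        · rw [show t + 1 + 1 - (run + 1) = t + 1 - run from by omega] at this
          rw [if_pos (by omega : 3 ≤ run + 1)] at this
          rw [show (v || decide (3 ≤ run + 1)) = true from by simp [show 3 ≤ run + 1 from by omega]] at this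
          rw [this, pvPost, pvPost]
          simp [show t + 1 + k + 1 = t + (k + 1) + 1 from by omega]
        · intro i hi1 hi2
          rcases Nat.lt_or_ge i (t + 1) with hlt | hge
          · rw [hxy]; exact hw i (by omega) (by omega)
          · rw [show i = t + 1 from by omega]
      · -- the pending run is shorter than 3: A's matrix is untouched
        rw [if_neg hr3]
        have hA : pvStepA c (m, run, (v || decide (3 ≤ run))) t
            = if 3 ≤ run + 1
              then (pvWhileA c m (t + 1) (run + 1), run + 1, true)
              else (m, run + 1, v || decide (3 ≤ run)) := by
          have hcond : (PySem.Str.lower (pvCell m t c) == PySem.Str.lower (pvCell m (t + 1) c)) = true := by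
            rw [hxy]; simp
          simp [pvStepA, hcond]
        by_cases h23 : 3 ≤ run + 1
        · -- the run was 2 and becomes 3: A's first lowering of this run
          have hrun2 : run = 2 := by omega
          subst hrun2
          rw [hA, if_pos h23]
          have hwhile : pvWhileA c m (t + 1) 3 = pvFlushB c m (t + 1 - 2) 3 := by
            have := pv_whileA_eq_flush c 3 m (t + 1 - 2) ?_
            · rwa [show t + 1 - 2 + 3 - 1 = t + 1 from by omega] at this
            · intro kk hkk
              rw [show t + 1 - 2 + 3 - 1 = t + 1 from by omega, hxy]
              rcases Nat.lt_or_ge (t + 1 - 2 + kk) (t + 1) with hlt | hge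
              · exact hw _ (by omega) (by omega)
              · rw [show t + 1 - 2 + kk = t + 1 from by omega, hxy]
          rw [hwhile]
          have := ih (t + 1) 3 m v (by omega) (by omega) ?_
          · rw [show t + 1 + 1 - 3 = t + 1 - 2 from by omega] at this
            rw [if_pos (by omega : (3:Nat) ≤ 3)] at this
            rw [show (v || decide ((3:Nat) ≤ 3)) = true from by simp] at this
            rw [show (2:Nat) + 1 = 3 from rfl]
            rw [this, pvPost, pvPost]
            simp [show t + 1 + k + 1 = t + (k + 1) + 1 from by omega]
          · intro i hi1 hi2
            rcases Nat.lt_or_ge i (t + 1) with hlt | hge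
            · rw [hxy]; exact hw i (by omega) (by omega)
            · rw [show i = t + 1 from by omega]
        · -- the run was 1 and becomes 2
          have hrun1 : run = 1 := by omega
          subst hrun1
          rw [hA, if_neg h23]
          have := ih (t + 1) 2 m v (by omega) (by omega) ?_
          · rw [if_neg (by omega : ¬ (3:Nat) ≤ 2)] at this
            rw [show (v || decide ((3:Nat) ≤ 2)) = (v || decide ((3:Nat) ≤ 1)) from by simp] at this
            rw [show (1:Nat) + 1 = 2 from rfl]
            rw [this, pvPost, pvPost]
            simp [show t + 1 + k + 1 = t + (k + 1) + 1 from by omega]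
          · intro i hi1 hi2
            rcases Nat.lt_or_ge i (t + 1) with hlt | hge
            · rw [hxy]; exact hw i (by omega) (by omega)
            · rw [show i = t + 1 from by omega]
    · -- the run breaks at t+1
      by_cases hr3 : 3 ≤ run
      · -- the fused form now flushes exactly the window A has already lowercased
        have hB : pvStepF c (m, run, v) t = (pvFlushB c m (t + 1 - run) run, 1, true) := by
          simp [pvStepF, hxy, hr3]
        have hA : pvStepA c (pvFlushB c m (t + 1 - run) run, run, (v || decide (3 ≤ run))) t
            = (pvFlushB c m (t + 1 - run) run, 1, (v || decide (3 ≤ run))) := by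
          have hcond : (PySem.Str.lower (pvCell (pvFlushB c m (t + 1 - run) run) t c)
              == PySem.Str.lower (pvCell (pvFlushB c m (t + 1 - run) run) (t + 1) c)) = false := by
            rw [pv_low_cell_flush, pv_low_cell_flush]
            exact beq_eq_false_iff_ne.mpr (fun h => hxy h.symm)
          simp [pvStepA, hcond]
        rw [if_pos hr3, hA, hB]
        have := ih (t + 1) 1 (pvFlushB c m (t + 1 - run) run) true (by omega) (by omega) ?_
        · rw [if_neg (by omega : ¬ (3:Nat) ≤ 1)] at this
          rw [show (true || decide ((3:Nat) ≤ 1)) = true from by simp] at this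
          rw [show (v || decide (3 ≤ run)) = true from by simp [hr3]]
          rw [this, pvPost, pvPost]
          simp [show t + 1 + k + 1 = t + (k + 1) + 1 from by omega]
        · intro i hi1 hi2
          rw [show i = t + 1 from by omega]
      · have hB : pvStepF c (m, run, v) t = (m, 1, v) := by
          simp [pvStepF, hxy, hr3]
        have hA : pvStepA c (m, run, (v || decide (3 ≤ run))) t
            = (m, 1, (v || decide (3 ≤ run))) := by
          have hcond : (PySem.Str.lower (pvCell m t c) == PySem.Str.lower (pvCell m (t + 1) c)) = false := by
            exact beq_eq_false_iff_ne.mpr (fun h => hxy h.symm)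
          simp [pvStepA, hcond, show ¬ (3:Nat) ≤ 1 from by omega]
        rw [if_neg hr3, hA, hB]
        have := ih (t + 1) 1 m v (by omega) (by omega) ?_
        · rw [if_neg (by omega : ¬ (3:Nat) ≤ 1)] at this
          rw [show (v || decide ((3:Nat) ≤ 1)) = (v || decide (3 ≤ run)) from by simp [hr3, show ¬ (3:Nat) ≤ 1 from by omega]] at this
          rw [this, pvPost, pvPost]
          simp [show t + 1 + k + 1 = t + (k + 1) + 1 from by omega]
        · intro i hi1 hi2
          rw [show i = t + 1 from by omega]

theorem pv_colA_eq_colF (n c : Nat) (mv : List (List String) × Bool) :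
    pvColA n c mv = pvColF n c mv := by
  have hmain := pv_main c (n - 1) 0 1 mv.1 mv.2 (by omega) (by omega)
    (by intro i h1 h2; rw [show i = 0 from by omega])
  rw [if_neg (by omega : ¬ (3:Nat) ≤ 1)] at hmain
  rw [show (mv.2 || decide ((3:Nat) ≤ 1)) = mv.2 from by simp] at hmain
  unfold pvColA pvColF
  rw [List.range_eq_range', hmain]
  rcases Nat.eq_zero_or_pos n with rfl | hn
  · simp [pvPost, List.range']
  · unfold pvPost
    rw [show 0 + (n - 1) + 1 = n from by omega]
    by_cases h3 : 3 ≤ ((List.range' 0 (n-1)).foldl (pvStepF c) (mv.1, 1, mv.2)).2.1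
    · simp only [h3, if_true, if_pos h3]
      simp [h3]
    · simp only [h3, if_false, if_neg h3]
      simp [h3]

-- proof helper: apply a list of segments (a, b) by lowering column c on rows a..b-1
def pvApplySegs (c : Nat) (m : List (List String)) (segs : List (Nat × Nat)) :
    List (List String) :=
  segs.foldl (fun m s => pvFlushB c m s.1 (s.2 - s.1)) m

-- B's segment-application loop computes pvApplySegs and sets the flag iff segs is nonempty
theorem pv_applyB (c : Nat) (segs : List (Nat × Nat)) (mv : List (List String) × Bool) :
    segs.foldl
      (fun mv2 seg =>
        ((List.range' seg.1 (seg.2 - seg.1)).foldl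
           (fun m k => m.set k ((m.getD k []).set c (PySem.Str.lower ((m.getD k []).getD c ""))))
           mv2.1,
         true))
      mv
    = (pvApplySegs c mv.1 segs, mv.2 || decide (segs ≠ [])) := by
  induction segs generalizing mv with
  | nil => simp [pvApplySegs]
  | cons s rest ih =>
    rw [List.foldl_cons]
    rw [ih]
    have hfl : (List.range' s.1 (s.2 - s.1)).foldl
        (fun m k => m.set k ((m.getD k []).set c (PySem.Str.lower ((m.getD k []).getD c ""))))
        mv.1 = pvFlushB c mv.1 s.1 (s.2 - s.1) := by
      simp [pvFlushB, pvSetL, pvCell]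
    rw [hfl]
    simp [pvApplySegs]

theorem pv_low_cell_apply (c : Nat) (segs : List (Nat × Nat)) :
    ∀ (m : List (List String)) (i j : Nat),
    PySem.Str.lower (pvCell (pvApplySegs c m segs) i j) = PySem.Str.lower (pvCell m i j) := by
  induction segs with
  | nil => intro m i j; rfl
  | cons s rest ih =>
    intro m i j
    have : pvApplySegs c m (s :: rest) = pvApplySegs c (pvFlushB c m s.1 (s.2 - s.1)) rest := by
      simp [pvApplySegs]
    rw [this, ih, pv_low_cell_flush]

theorem pv_apply_concat (c : Nat) (m : List (List String)) (segs : List (Nat × Nat))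
    (s : Nat × Nat) :
    pvApplySegs c m (segs ++ [s]) = pvFlushB c (pvApplySegs c m segs) s.1 (s.2 - s.1) := by
  simp [pvApplySegs]

-- B's detection scan never discards a recorded segment
theorem pv_scan_ne_nil (m₀ : List (List String)) (c n : Nat) (L : List Nat) :
    ∀ (st : List (Nat × Nat) × Nat), st.1 ≠ [] → (L.foldl (pvScanStep m₀ c n) st).1 ≠ [] := by
  induction L with
  | nil => intro st h; simpa using h
  | cons a L ihL =>
    intro st h
    rw [List.foldl_cons]
    apply ihL
    unfold pvScanStep
    split_ifs with h1 h2
    · simp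
    · simpa using h
    · simpa using h

-- the bridge: the fused scan over rows t..t+k equals B's detection scan (on the untouched
-- matrix) followed by applying the recorded segments, with run = position + 1 - start
theorem pv_fused_staged (c n : Nat) (m₀ : List (List String)) (k : Nat) :
    ∀ (t start : Nat) (segs : List (Nat × Nat)) (v : Bool),
    start ≤ t → t + k + 1 ≤ n →
    (List.range' t k).foldl (pvStepF c)
        (pvApplySegs c m₀ segs, t + 1 - start, v || decide (segs ≠ []))
      = ((fun S => (pvApplySegs c m₀ S.1, t + k + 1 - S.2, v || decide (S.1 ≠ [])))
          ((List.range' (t + 1) k).foldl (pvScanStep m₀ c n) (segs, start)))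
      ∧ ((List.range' (t + 1) k).foldl (pvScanStep m₀ c n) (segs, start)).2 ≤ t + k := by
  induction k with
  | zero =>
    intro t start segs v hst _
    constructor
    · simp [List.range']
    · simpa [List.range'] using hst
  | succ k ih =>
    intro t start segs v hst hn
    rw [List.range'_succ, List.foldl_cons, List.range'_succ, List.foldl_cons]
    have hjn : ¬ (t + 1 = n) := by omega
    by_cases hxy : PySem.Str.lower (pvCell m₀ (t + 1) c) = PySem.Str.lower (pvCell m₀ t c)
    · -- run continues
      have hF : pvStepF c (pvApplySegs c m₀ segs, t + 1 - start, v || decide (segs ≠ [])) t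
          = (pvApplySegs c m₀ segs, (t + 1 - start) + 1, v || decide (segs ≠ [])) := by
        have hc : (PySem.Str.lower (pvCell (pvApplySegs c m₀ segs) (t + 1) c)
            == PySem.Str.lower (pvCell (pvApplySegs c m₀ segs) t c)) = true := by
          rw [pv_low_cell_apply, pv_low_cell_apply, hxy]; simp
        simp [pvStepF, hc]
      have hx0 : PySem.Str.lower ((m₀[t + 1]?.getD [])[c]?.getD "") =
          PySem.Str.lower ((m₀[t]?.getD [])[c]?.getD "") := by
        simpa [pvCell, List.getD] using hxy
      have hS : pvScanStep m₀ c n (segs, start) (t + 1) = (segs, start) := by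
        simp [pvScanStep, hjn, hx0]
      rw [hF, hS]
      have := ih (t + 1) start segs v (by omega) (by omega)
      rw [show (t + 1) + 1 - start = (t + 1 - start) + 1 from by omega] at this
      rw [show (t + 1) + k + 1 = t + (k + 1) + 1 from by omega] at this
      rw [show (t + 1) + k = t + (k + 1) from by omega] at this
      exact this
    · -- run breaks at row t+1
      have hx1 : ¬ (PySem.Str.lower ((m₀[t + 1]?.getD [])[c]?.getD "") =
          PySem.Str.lower ((m₀[t]?.getD [])[c]?.getD "")) := by
        simpa [pvCell, List.getD] using hxy
      have hxy' : ¬ (PySem.Str.lower (pvCell (pvApplySegs c m₀ segs) (t + 1) c)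
          = PySem.Str.lower (pvCell (pvApplySegs c m₀ segs) t c)) := by
        rw [pv_low_cell_apply, pv_low_cell_apply]; exact hxy
      by_cases h3 : 3 ≤ t + 1 - start
      · have hF : pvStepF c (pvApplySegs c m₀ segs, t + 1 - start, v || decide (segs ≠ [])) t
            = (pvFlushB c (pvApplySegs c m₀ segs) (t + 1 - (t + 1 - start)) (t + 1 - start),
               1, true) := by
          simp [pvStepF, hxy', h3]
        have hS : pvScanStep m₀ c n (segs, start) (t + 1)
            = (segs ++ [(start, t + 1)], t + 1) := by
          simp [pvScanStep, hx1, h3]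
        rw [hF, hS]
        rw [show t + 1 - (t + 1 - start) = start from by omega]
        have happ : pvFlushB c (pvApplySegs c m₀ segs) start (t + 1 - start)
            = pvApplySegs c m₀ (segs ++ [(start, t + 1)]) := by
          rw [pv_apply_concat]
        rw [happ]
        have := ih (t + 1) (t + 1) (segs ++ [(start, t + 1)]) true (le_refl _) (by omega)
        rw [show (t + 1) + 1 - (t + 1) = 1 from by omega] at this
        rw [show (decide (segs ++ [(start, t + 1)] ≠ []) : Bool) = true from by simp] at this
        rw [Bool.or_true] at this
        rw [show (t + 1) + k + 1 = t + (k + 1) + 1 from by omega] at this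
        rw [show (t + 1) + k = t + (k + 1) from by omega] at this
        obtain ⟨h1, h2⟩ := this
        refine ⟨?_, by omega⟩
        rw [h1]
        have hdec : (decide (((List.range' (t + 1 + 1) k).foldl (pvScanStep m₀ c n)
            (segs ++ [(start, t + 1)], t + 1)).1 ≠ []) : Bool) = true := by
          simp only [decide_eq_true_eq]
          exact pv_scan_ne_nil m₀ c n _ _ (by simp)
        simp [hdec]
      · have hF : pvStepF c (pvApplySegs c m₀ segs, t + 1 - start, v || decide (segs ≠ [])) t
            = (pvApplySegs c m₀ segs, 1, v || decide (segs ≠ [])) := by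
          simp [pvStepF, hxy', h3]
        have hS : pvScanStep m₀ c n (segs, start) (t + 1) = (segs, t + 1) := by
          simp [pvScanStep, hx1, h3]
        rw [hF, hS]
        have := ih (t + 1) (t + 1) segs v (le_refl _) (by omega)
        rw [show (t + 1) + 1 - (t + 1) = 1 from by omega] at this
        rw [show (t + 1) + k + 1 = t + (k + 1) + 1 from by omega] at this
        rw [show (t + 1) + k = t + (k + 1) from by omega] at this
        exact this

-- the fused single pass equals B's detect-then-apply column step
theorem pv_colF_eq_colAlt (n c : Nat) (mv : List (List String) × Bool) :
    pvColF n c mv = pvColAlt n c mv := by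
  rcases Nat.eq_zero_or_pos n with rfl | hn
  · simp [pvColF, pvColAlt, List.range']
  · obtain ⟨h1, h2⟩ := pv_fused_staged c n mv.1 (n - 1) 0 0 [] mv.2 (le_refl _) (by omega)
    rw [show pvApplySegs c mv.1 [] = mv.1 from rfl] at h1
    rw [show (0:Nat) + 1 - 0 = 1 from rfl] at h1
    rw [show (decide (([] : List (Nat × Nat)) ≠ []) : Bool) = false from by simp] at h1
    rw [Bool.or_false] at h1
    rw [show 0 + (n - 1) + 1 = n from by omega] at h1
    rw [show (0:Nat) + 1 = 1 from rfl] at h1 h2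
    set S := (List.range' 1 (n - 1)).foldl (pvScanStep mv.1 c n) ([], 0) with hSdef
    -- B's full scan (range' 1 n) = the first n-1 steps, then the sentinel step j = n
    have hn1 : n = (n - 1) + 1 := by omega
    have hrange : List.range' 1 n = List.range' 1 (n - 1) ++ [1 + (n - 1)] := by
      conv_lhs => rw [hn1]
      rw [List.range'_concat]
      simp
    rw [show 1 + (n - 1) = n from by omega] at hrange
    have hlast : pvScanStep mv.1 c n S n
        = ((if 3 ≤ n - S.2 then S.1 ++ [(S.2, n)] else S.1), n) := by
      unfold pvScanStep
      rw [if_pos (Or.inl rfl)]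
    unfold pvColF pvColAlt
    rw [List.range_eq_range', h1, hrange, List.foldl_append, List.foldl_cons, List.foldl_nil,
      hlast, pv_applyB]
    dsimp only
    by_cases h3 : 3 ≤ n - S.2
    · simp only [h3, if_true]
      rw [pv_apply_concat]
      rw [show ((S.2, n).2 : Nat) - (S.2, n).1 = n - S.2 from rfl]
      rw [show ((S.2, n).1 : Nat) = S.2 from rfl]
      rw [show n - (n - S.2) = S.2 from by omega]
      simp
    · simp only [h3, if_false]

-- ===== VERDICT (by name: the statement is the Claim_ definition above) =====
theorem validar_gemas_coluna_spec : Claim_equal_validar_gemas_coluna := by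
  intro matriz _ _
  unfold Spec_validar_gemas_coluna validar_gemas_coluna validar_gemas_coluna_alt
  have hfun : (fun (mv : List (List String) × Bool) c => pvColA matriz.length c mv)
      = (fun mv c => pvColAlt matriz.length c mv) := by
    funext mv c
    exact (pv_colA_eq_colF matriz.length c mv).trans (pv_colF_eq_colAlt matriz.length c mv)
  rw [hfun]
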